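-- pv_equiv track=rewrite | github.com/mdob367/Advent-Of-Code | 2024/Day 8.py | find_antinodes
-- ===== SOURCE A (Python) =====
-- import math
--
-- def parse_map(input_map):
--     res = []
--     for line in input_map.split('\n'):
--         res.append(list(line))
--
--     return res
--
-- def in_map(pos, map):
--     return 0 <= pos[0] < len(map) and 0 <= pos[1] < len(map[0])
--
-- def find_antennas(input_map):
--     antennas = {}
--     for i in range(len(input_map)):
--         for j in range(len(input_map[0])):
--             if input_map[i][j].isalnum():
--                 antennas[input_map[i][j]] = antennas.get(input_map[i][j], []) + [(i,j)]
--     return antennas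
--
-- def parse_input(input):
--     input = parse_map(input)
--     antennas = find_antennas(input)
--     return input, antennas
--
-- def find_antinodes(puzz_input):
--     input_map, antennas = parse_input(puzz_input)
--     # Loop through every 2 pairs of antennas
--     antinodes = []
--     for antenna, locs in antennas.items():
--         if len(locs)<2:
--             continue
--         for i in range(len(locs)):
--             for j in range(i+1, len(locs)):
--                 x_dist = locs[i][0] - locs[j][0]
--                 y_dist = locs[i][1] - locs[j][1]
--                 gcd = math.gcd(x_dist, y_dist)
--                 x_dist //= gcd
--                 y_dist //= gcd
--                 option = locs[i][0], locs[i][1]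
--                 while in_map(option, input_map):
--                     antinodes.append(option)
--                     option = option[0] + x_dist, option[1] + y_dist
--                 option = locs[j][0], locs[j][1]
--                 while in_map(option, input_map):
--                     antinodes.append(option)
--                     option = option[0] - x_dist, option[1] - y_dist
--     return set(antinodes)
-- ===== SOURCE B (Python) =====
-- import math
--
-- def _ray(x, y, dx, dy, h, w):
--     # all points (x,y)+k*(dx,dy), k>=0, inside the h x w grid, found by a
--     # closed-form bound on k instead of step-and-test walking
--     if not (0 <= x < h and 0 <= y < w):
--         return []
--     ks = []
--     if dx > 0:
--         ks.append((h - 1 - x) // dx)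
--     elif dx < 0:
--         ks.append(x // -dx)
--     if dy > 0:
--         ks.append((w - 1 - y) // dy)
--     elif dy < 0:
--         ks.append(y // -dy)
--     kmax = min(ks) if ks else 0
--     return [(x + k * dx, y + k * dy) for k in range(kmax + 1)]
--
-- def find_antinodes(puzz_input):
--     lines = puzz_input.split('\n')
--     h = len(lines)
--     w = len(lines[0])
--     antennas = {}
--     for i, line in enumerate(lines):
--         for j, ch in enumerate(line[:w]):
--             if ch.isalnum():
--                 antennas.setdefault(ch, []).append((i, j))
--     antinodes = set()
--     for locs in antennas.values():
--         for a, p in enumerate(locs):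
--             for q in locs[a + 1:]:
--                 dx = p[0] - q[0]
--                 dy = p[1] - q[1]
--                 g = math.gcd(dx, dy)
--                 dx //= g
--                 dy //= g
--                 antinodes.update(_ray(p[0], p[1], dx, dy, h, w))
--                 antinodes.update(_ray(q[0], q[1], -dx, -dy, h, w))
--     return antinodes
-- ===== Notes on version B (the rewrite author's own statement) =====
-- stated objective: alternative
-- what changed: Per antenna pair, B computes the in-grid multiplier range for the gcd-reduced step in closed form (floor divisions against the grid bounds) and emits each whole ray at once into a set, instead of A's two per-cell step-and-test while-loop walks; the antenna dict is built with enumerate/setdefault and pairs are taken by slicing.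
import Mathlib
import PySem

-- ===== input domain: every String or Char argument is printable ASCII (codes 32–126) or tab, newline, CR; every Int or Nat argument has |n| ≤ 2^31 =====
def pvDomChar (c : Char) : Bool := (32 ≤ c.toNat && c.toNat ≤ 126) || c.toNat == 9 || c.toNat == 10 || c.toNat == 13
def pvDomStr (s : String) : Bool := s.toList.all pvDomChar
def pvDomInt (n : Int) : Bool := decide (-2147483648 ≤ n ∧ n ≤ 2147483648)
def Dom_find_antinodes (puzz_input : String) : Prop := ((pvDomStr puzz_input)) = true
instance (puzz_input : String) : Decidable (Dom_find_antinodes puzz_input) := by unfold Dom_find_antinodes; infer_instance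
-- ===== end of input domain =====

-- B replaces A's two per-cell step-and-test while-loop walks per antenna pair by one closed-form
-- multiplier-range computation per ray (same asymptotics, different decomposition).

-- ===== PORT A =====
-- in_map(pos, map); map[0] read with pyGetD (split('\n') never returns an empty list)
def pvInMapA (pos : Int × Int) (m : List (List Char)) : Bool :=
  decide (0 ≤ pos.1 ∧ pos.1 < PySem.List.len m) &&
  decide (0 ≤ pos.2 ∧ pos.2 < PySem.List.len (PySem.List.pyGetD m 0 []))

-- find_antennas: grid scan by indices; input_map[i][j] via pyGetD (exact under Pre_, where j < len(row))
def pvFindAntennasA (input_map : List (List Char)) : PySem.Dict Char (List (Int × Int)) :=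
  (PySem.List.pyRange 0 (PySem.List.len input_map) 1).foldl (fun d i =>
    (PySem.List.pyRange 0 (PySem.List.len (PySem.List.pyGetD input_map 0 [])) 1).foldl (fun d j =>
      if PySem.Chars.isalnum (PySem.List.pyGetD (PySem.List.pyGetD input_map i []) j ' ') then
        d.insert (PySem.List.pyGetD (PySem.List.pyGetD input_map i []) j ' ')
          (d.getD (PySem.List.pyGetD (PySem.List.pyGetD input_map i []) j ' ') [] ++ [(i, j)])
      else d) d)
    PySem.Dict.empty

-- the 'while in_map(option, ...)' walk; fuel: a walk with step ≠ (0,0) (always the case for a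
-- pair of distinct antennas, as in Python) visits fewer than len(map)+len(map[0])+1 cells
def pvWalkA (m : List (List Char)) (dx dy : Int) : Nat → (Int × Int) → List (Int × Int)
  | 0, _ => []
  | fuel + 1, opt => if pvInMapA opt m then opt :: pvWalkA m dx dy fuel (opt.1 + dx, opt.2 + dy) else []

def find_antinodes (puzz_input : String) : List (Int × Int) :=
  let input_map : List (List Char) := ((PySem.Str.split? puzz_input "\n").getD []).map String.toList
  let antennas := pvFindAntennasA input_map
  let fuel := input_map.length + (PySem.List.pyGetD input_map 0 []).length + 1
  let antinodes : List (Int × Int) := antennas.items.foldl (fun acc kv =>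
    if PySem.List.len kv.2 < 2 then acc else
    (PySem.List.pyRange 0 (PySem.List.len kv.2) 1).foldl (fun acc i =>
      (PySem.List.pyRange (i + 1) (PySem.List.len kv.2) 1).foldl (fun acc j =>
        let li := PySem.List.pyGetD kv.2 i (0, 0)
        let lj := PySem.List.pyGetD kv.2 j (0, 0)
        let g : Int := Int.gcd (li.1 - lj.1) (li.2 - lj.2)
        let xd := PySem.Int.floordiv (li.1 - lj.1) g
        let yd := PySem.Int.floordiv (li.2 - lj.2) g
        (acc ++ pvWalkA input_map xd yd fuel (li.1, li.2)) ++
          pvWalkA input_map (-xd) (-yd) fuel (lj.1, lj.2)) acc) acc) []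
  PySem.Set.ofList antinodes

-- ===== PORT B =====
-- _ray: closed-form bound kmax on the multiplier k, then one comprehension
def pvRayB (x y dx dy h w : Int) : List (Int × Int) :=
  if ¬(0 ≤ x ∧ x < h ∧ 0 ≤ y ∧ y < w) then []
  else
    let ks : List Int :=
      (if 0 < dx then [PySem.Int.floordiv (h - 1 - x) dx]
       else if dx < 0 then [PySem.Int.floordiv x (-dx)] else []) ++
      (if 0 < dy then [PySem.Int.floordiv (w - 1 - y) dy]
       else if dy < 0 then [PySem.Int.floordiv y (-dy)] else [])
    let kmax := match PySem.List.min? ks (fun k => k) with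
      | some k => k
      | none => 0
    (PySem.List.pyRange 0 (kmax + 1) 1).map (fun k => (x + k * dx, y + k * dy))

def find_antinodes_alt (puzz_input : String) : List (Int × Int) :=
  let lines : List (List Char) := ((PySem.Str.split? puzz_input "\n").getD []).map String.toList
  let h : Int := PySem.List.len lines
  let w : Int := PySem.List.len (PySem.List.pyGetD lines 0 [])
  let antennas : PySem.Dict Char (List (Int × Int)) :=
    (PySem.List.enumerate lines).foldl (fun d il =>
      (PySem.List.enumerate (PySem.List.slice il.2 none (some w))).foldl (fun d jc =>
        if PySem.Chars.isalnum jc.2 then d.modify jc.2 [] (· ++ [(il.1, jc.1)]) else d) d)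
      PySem.Dict.empty
  antennas.values.foldl (fun s locs =>
    (PySem.List.enumerate locs).foldl (fun s ap =>
      (PySem.List.slice locs (some (ap.1 + 1)) none).foldl (fun s q =>
        let g : Int := Int.gcd (ap.2.1 - q.1) (ap.2.2 - q.2)
        let dx := PySem.Int.floordiv (ap.2.1 - q.1) g
        let dy := PySem.Int.floordiv (ap.2.2 - q.2) g
        PySem.Set.update (PySem.Set.update s (pvRayB ap.2.1 ap.2.2 dx dy h w))
          (pvRayB q.1 q.2 (-dx) (-dy) h w)) s) s)
    PySem.Set.empty

-- ===== PRECONDITION & SPEC =====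
-- Pre_ excludes exactly the inputs where some line is shorter than the first line:
-- there A's grid scan indexes past the line's end and raises IndexError.
def Pre_find_antinodes (puzz_input : String) : Prop :=
  ∀ line ∈ ((PySem.Str.split? puzz_input "\n").getD []).map String.toList,
    (PySem.List.pyGetD (((PySem.Str.split? puzz_input "\n").getD []).map String.toList) 0 []).length ≤ line.length
instance (puzz_input : String) : Decidable (Pre_find_antinodes puzz_input) := by unfold Pre_find_antinodes; infer_instance

def pvWitness_find_antinodes : String := "ab1\n..1\na.."

def Spec_find_antinodes (puzz_input : String) (out : List (Int × Int)) : Prop := out = find_antinodes_alt puzz_input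
instance (puzz_input : String) (out : List (Int × Int)) : Decidable (Spec_find_antinodes puzz_input out) := by unfold Spec_find_antinodes; infer_instance

-- ===== CLAIM (what is proved, stated in full; the proofs are below) =====
def Claim_equal_find_antinodes : Prop := ∀ (puzz_input : String), Dom_find_antinodes puzz_input → Pre_find_antinodes puzz_input → Spec_find_antinodes puzz_input (find_antinodes puzz_input)

-- ===== LEMMAS AND PROOFS =====

-- in-grid predicate and the closed-form per-coordinate bound, proof-side views of the ports
def pvInB (h w x y : Int) : Prop := 0 ≤ x ∧ x < h ∧ 0 ≤ y ∧ y < w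

def pvBnd (p s n : Int) : Int := if 0 < s then (n - 1 - p) / s else p / (-s)

def pvK (h w x y dx dy : Int) : Int :=
  if dx = 0 then pvBnd y dy w
  else if dy = 0 then pvBnd x dx h
  else min (pvBnd x dx h) (pvBnd y dy w)

lemma pvBnd_nonneg (p s n : Int) (hs : s ≠ 0) (h0 : 0 ≤ p) (h1 : p < n) : 0 ≤ pvBnd p s n := by
  unfold pvBnd; split_ifs with h
  · exact Int.ediv_nonneg (by omega) (by omega)
  · exact Int.ediv_nonneg h0 (by omega)


lemma pvBnd_pos_iff (p s n : Int) (hs : s ≠ 0) (h0 : 0 ≤ p) (h1 : p < n) :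
    (0 ≤ p + s ∧ p + s < n) ↔ 0 < pvBnd p s n := by
  unfold pvBnd; split_ifs with h
  · rw [show (0:Int) < (n-1-p)/s ↔ 1 ≤ (n-1-p)/s by omega, Int.le_ediv_iff_mul_le h]
    omega
  · rw [show (0:Int) < p/(-s) ↔ 1 ≤ p/(-s) by omega, Int.le_ediv_iff_mul_le (by omega)]
    omega


lemma pvBnd_step (p s n : Int) (hs : s ≠ 0) (h : 0 ≤ p + s ∧ p + s < n) :
    pvBnd (p + s) s n = pvBnd p s n - 1 := by
  unfold pvBnd; split_ifs with hpos
  · rw [show n - 1 - (p + s) = n - 1 - p + (-1) * s by ring, Int.add_mul_ediv_right _ _ hs]; ring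
  · rw [show p + s = p + (-1) * (-s) by ring, Int.add_mul_ediv_right _ _ (by omega)]; ring


lemma pvBnd_le (p s n : Int) (hs : s ≠ 0) (h0 : 0 ≤ p) (h1 : p < n) : pvBnd p s n ≤ n - 1 := by
  unfold pvBnd; split_ifs with h
  · calc (n-1-p)/s ≤ n-1-p := Int.ediv_le_self _ (by omega)
      _ ≤ n - 1 := by omega
  · calc p/(-s) ≤ p := Int.ediv_le_self _ h0
      _ ≤ n - 1 := by omega


lemma pvK_nonneg (h w x y dx dy : Int) (hstep : ¬(dx = 0 ∧ dy = 0)) (hin : pvInB h w x y) :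
    0 ≤ pvK h w x y dx dy := by
  obtain ⟨a1, a2, a3, a4⟩ := hin
  unfold pvK; split_ifs with h1 h2
  · exact pvBnd_nonneg _ _ _ (by tauto) a3 a4
  · exact pvBnd_nonneg _ _ _ h1 a1 a2
  · exact le_min (pvBnd_nonneg _ _ _ h1 a1 a2) (pvBnd_nonneg _ _ _ h2 a3 a4)


lemma pvK_pos_iff (h w x y dx dy : Int) (hstep : ¬(dx = 0 ∧ dy = 0)) (hin : pvInB h w x y) :
    pvInB h w (x + dx) (y + dy) ↔ 0 < pvK h w x y dx dy := by
  obtain ⟨a1, a2, a3, a4⟩ := hin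
  unfold pvK pvInB; split_ifs with h1 h2
  · subst h1; rw [← pvBnd_pos_iff y dy w (by tauto) a3 a4]; omega
  · subst h2; rw [← pvBnd_pos_iff x dx h h1 a1 a2]; omega
  · rw [lt_min_iff, ← pvBnd_pos_iff x dx h h1 a1 a2, ← pvBnd_pos_iff y dy w h2 a3 a4]; omega


lemma pvK_step (h w x y dx dy : Int) (hstep : ¬(dx = 0 ∧ dy = 0)) (hin : pvInB h w x y)
    (hnext : pvInB h w (x + dx) (y + dy)) :
    pvK h w (x + dx) (y + dy) dx dy = pvK h w x y dx dy - 1 := by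
  obtain ⟨a1, a2, a3, a4⟩ := hin
  obtain ⟨b1, b2, b3, b4⟩ := hnext
  unfold pvK; split_ifs with h1 h2
  · subst h1; exact pvBnd_step y dy w (by tauto) ⟨b3, b4⟩
  · subst h2; exact pvBnd_step x dx h h1 ⟨b1, b2⟩
  · rw [pvBnd_step x dx h h1 ⟨b1, b2⟩, pvBnd_step y dy w h2 ⟨b3, b4⟩]; omega


lemma pvK_lt (h w x y dx dy : Int) (hstep : ¬(dx = 0 ∧ dy = 0)) (hin : pvInB h w x y) :
    pvK h w x y dx dy < h + w := by
  obtain ⟨a1, a2, a3, a4⟩ := hin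
  unfold pvK; split_ifs with h1 h2
  · have := pvBnd_le y dy w (by tauto) a3 a4; omega
  · have := pvBnd_le x dx h h1 a1 a2; omega
  · have := pvBnd_le x dx h h1 a1 a2
    have := pvBnd_le y dy w h2 a3 a4
    omega


lemma min?_single (a : Int) : PySem.List.min? [a] (fun k => k) = some a := by
  simp [PySem.List.min?]
lemma min?_pair (a b : Int) : PySem.List.min? [a, b] (fun k => k) = some (min a b) := by
  simp only [PySem.List.min?, List.foldl]
  split_ifs <;> simp <;> omega

lemma pvKmax_eq (h w x y dx dy : Int) (hstep : ¬(dx = 0 ∧ dy = 0)) :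
    (match PySem.List.min?
      ((if 0 < dx then [PySem.Int.floordiv (h - 1 - x) dx]
        else if dx < 0 then [PySem.Int.floordiv x (-dx)] else []) ++
       (if 0 < dy then [PySem.Int.floordiv (w - 1 - y) dy]
        else if dy < 0 then [PySem.Int.floordiv y (-dy)] else [])) (fun k => k) with
      | some k => k
      | none => 0) = pvK h w x y dx dy := by
  have ex : 0 < dx → PySem.Int.floordiv (h - 1 - x) dx = (h - 1 - x) / dx :=
    fun hp => PySem.Int.floordiv_eq_ediv_of_pos hp
  have ex' : dx < 0 → PySem.Int.floordiv x (-dx) = x / (-dx) :=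
    fun hp => PySem.Int.floordiv_eq_ediv_of_pos (by omega)
  have ey : 0 < dy → PySem.Int.floordiv (w - 1 - y) dy = (w - 1 - y) / dy :=
    fun hp => PySem.Int.floordiv_eq_ediv_of_pos hp
  have ey' : dy < 0 → PySem.Int.floordiv y (-dy) = y / (-dy) :=
    fun hp => PySem.Int.floordiv_eq_ediv_of_pos (by omega)
  rcases lt_trichotomy dx 0 with hdx | hdx | hdx <;> rcases lt_trichotomy dy 0 with hdy | hdy | hdy
  · have a1 : ¬ (0 < dx) := by omega
    have a2 : dx < 0 := hdx
    have a3 : ¬ dx = 0 := by omega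
    have b1 : ¬ (0 < dy) := by omega
    have b2 : dy < 0 := hdy
    have b3 : ¬ dy = 0 := by omega
    simp [pvK, pvBnd, min?_pair, min?_single, List.singleton_append, a1, a2, a3, ex' a2, b1, b2, b3, ey' b2]
  · have a1 : ¬ (0 < dx) := by omega
    have a2 : dx < 0 := hdx
    have a3 : ¬ dx = 0 := by omega
    subst hdy
    simp [pvK, pvBnd, min?_pair, min?_single, List.singleton_append, a1, a2, a3, ex' a2]
  · have a1 : ¬ (0 < dx) := by omega
    have a2 : dx < 0 := hdx
    have a3 : ¬ dx = 0 := by omega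
    have b1 : 0 < dy := hdy
    have b3 : ¬ dy = 0 := by omega
    simp [pvK, pvBnd, min?_pair, min?_single, List.singleton_append, a1, a2, a3, ex' a2, b1, b3, lt_irrefl, ey b1]
  · subst hdx
    have b1 : ¬ (0 < dy) := by omega
    have b2 : dy < 0 := hdy
    have b3 : ¬ dy = 0 := by omega
    simp [pvK, pvBnd, min?_pair, min?_single, List.singleton_append, b1, b2, b3, ey' b2]
  · exact absurd ⟨hdx, hdy⟩ hstep
  · subst hdx
    have b1 : 0 < dy := hdy
    have b3 : ¬ dy = 0 := by omega
    simp [pvK, pvBnd, min?_pair, min?_single, List.singleton_append, b1, b3, lt_irrefl, ey b1]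
  · have a1 : 0 < dx := hdx
    have a3 : ¬ dx = 0 := by omega
    have b1 : ¬ (0 < dy) := by omega
    have b2 : dy < 0 := hdy
    have b3 : ¬ dy = 0 := by omega
    simp [pvK, pvBnd, min?_pair, min?_single, List.singleton_append, a1, a3, lt_irrefl, ex a1, b1, b2, b3, ey' b2]
  · have a1 : 0 < dx := hdx
    have a3 : ¬ dx = 0 := by omega
    subst hdy
    simp [pvK, pvBnd, min?_pair, min?_single, List.singleton_append, a1, a3, lt_irrefl, ex a1]
  · have a1 : 0 < dx := hdx
    have a3 : ¬ dx = 0 := by omega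
    have b1 : 0 < dy := hdy
    have b3 : ¬ dy = 0 := by omega
    simp [pvK, pvBnd, min?_pair, min?_single, List.singleton_append, a1, a3, lt_irrefl, ex a1, b1, b3, lt_irrefl, ey b1]

-- B's ray in closed form
lemma pvRayB_eq_of_inB (h w x y dx dy : Int) (hstep : ¬(dx = 0 ∧ dy = 0)) (hin : pvInB h w x y) :
    pvRayB x y dx dy h w =
      (PySem.List.pyRange 0 (pvK h w x y dx dy + 1) 1).map (fun k => (x + k * dx, y + k * dy)) := by
  obtain ⟨a1, a2, a3, a4⟩ := hin
  simp only [pvRayB]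
  rw [pvKmax_eq h w x y dx dy hstep,
    if_neg (show ¬¬(0 ≤ x ∧ x < h ∧ 0 ≤ y ∧ y < w) from not_not_intro ⟨a1, a2, a3, a4⟩)]

lemma pvRayB_nil (h w x y dx dy : Int) (hin : ¬ pvInB h w x y) : pvRayB x y dx dy h w = [] := by
  unfold pvInB at hin
  simp only [pvRayB, if_pos hin]

-- the walk, related to the closed form
lemma pvInMapA_iff (p : Int × Int) (m : List (List Char)) :
    pvInMapA p m = true ↔ pvInB (m.length : Int) ((PySem.List.pyGetD m 0 []).length : Int) p.1 p.2 := by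
  simp [pvInMapA, pvInB, PySem.List.len_eq, and_assoc]

lemma pvWalkA_nil (m : List (List Char)) (dx dy : Int) (fuel : Nat) (p : Int × Int)
    (hp : ¬ pvInB (m.length : Int) ((PySem.List.pyGetD m 0 []).length : Int) p.1 p.2) :
    pvWalkA m dx dy fuel p = [] := by
  cases fuel with
  | zero => rfl
  | succ f =>
    have : ¬ (pvInMapA p m = true) := fun hc => hp ((pvInMapA_iff p m).1 hc)
    simp only [pvWalkA, Bool.not_eq_true] at this ⊢
    rw [this]
    rfl

lemma pvWalkA_eq_range (m : List (List Char)) (dx dy : Int) (hstep : ¬(dx = 0 ∧ dy = 0))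
    (n : Nat) : ∀ (fuel : Nat) (x y : Int),
    pvInB (m.length : Int) ((PySem.List.pyGetD m 0 []).length : Int) x y →
    pvK (m.length : Int) ((PySem.List.pyGetD m 0 []).length : Int) x y dx dy = (n : Int) →
    n < fuel →
    pvWalkA m dx dy fuel (x, y) = (List.range (n + 1)).map (fun (k : Nat) => (x + (k : Int) * dx, y + (k : Int) * dy)) := by
  induction n with
  | zero =>
    intro fuel x y hin hK hf
    cases fuel with
    | zero => omega
    | succ f =>
      simp only [pvWalkA]
      rw [if_pos ((pvInMapA_iff (x, y) m).2 hin)]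
      have hnext : ¬ pvInB (m.length : Int) ((PySem.List.pyGetD m 0 []).length : Int) (x + dx) (y + dy) := by
        rw [pvK_pos_iff _ _ _ _ _ _ hstep hin, hK]
        omega
      rw [pvWalkA_nil m dx dy f _ hnext]
      simp
  | succ n ih =>
    intro fuel x y hin hK hf
    cases fuel with
    | zero => omega
    | succ f =>
      simp only [pvWalkA]
      rw [if_pos ((pvInMapA_iff (x, y) m).2 hin)]
      have hnext : pvInB (m.length : Int) ((PySem.List.pyGetD m 0 []).length : Int) (x + dx) (y + dy) := by
        rw [pvK_pos_iff _ _ _ _ _ _ hstep hin, hK]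
        omega
      have hK' : pvK (m.length : Int) ((PySem.List.pyGetD m 0 []).length : Int) (x + dx) (y + dy) dx dy = (n : Int) := by
        rw [pvK_step _ _ _ _ _ _ hstep hin hnext, hK]
        push_cast
        ring
      rw [ih f (x + dx) (y + dy) hnext hK' (by omega)]
      conv_rhs => rw [List.range_succ_eq_map, List.map_cons, List.map_map]
      congr 1
      · simp
      · apply List.map_congr_left
        intro k _
        simp only [Function.comp_apply]
        rw [Prod.mk.injEq]
        constructor <;> push_cast <;> ring

lemma pvWalkA_eq_pvRayB (m : List (List Char)) (dx dy : Int) (hstep : ¬(dx = 0 ∧ dy = 0))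
    (p : Int × Int) :
    pvWalkA m dx dy (m.length + (PySem.List.pyGetD m 0 []).length + 1) p =
      pvRayB p.1 p.2 dx dy (m.length : Int) ((PySem.List.pyGetD m 0 []).length : Int) := by
  obtain ⟨x, y⟩ := p
  by_cases hin : pvInB (m.length : Int) ((PySem.List.pyGetD m 0 []).length : Int) x y
  · have h0 := pvK_nonneg _ _ _ _ _ _ hstep hin
    have hlt := pvK_lt _ _ _ _ _ _ hstep hin
    set K := pvK (m.length : Int) ((PySem.List.pyGetD m 0 []).length : Int) x y dx dy with hKdef
    rw [pvWalkA_eq_range m dx dy hstep K.toNat _ x y hin (by omega) (by omega)]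
    rw [pvRayB_eq_of_inB _ _ _ _ _ _ hstep hin, ← hKdef]
    rw [PySem.List.pyRange_one, List.map_map]
    have : (K + 1 - 0).toNat = K.toNat + 1 := by omega
    rw [this]
    apply List.map_congr_left
    intro k _
    simp
  · rw [pvWalkA_nil m dx dy _ _ hin, pvRayB_nil _ _ _ _ _ _ hin]

-- the degenerate step (0,0) (a pair p = q; unreachable from Python, where it raises before walking)
lemma pvWalkA_zero_step (m : List (List Char)) (fuel : Nat) (p : Int × Int)
    (hp : pvInB (m.length : Int) ((PySem.List.pyGetD m 0 []).length : Int) p.1 p.2) :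
    pvWalkA m 0 0 fuel p = List.replicate fuel p := by
  induction fuel with
  | zero => rfl
  | succ f ih =>
    simp only [pvWalkA]
    rw [if_pos ((pvInMapA_iff p m).2 hp), List.replicate_succ]
    have : (p.1 + 0, p.2 + 0) = p := by simp
    rw [this, ih]

-- enumerate: characterization
lemma pvEnum_length {α : Type} (xs : List α) (s : Int) : (PySem.List.enumerate xs s).length = xs.length := by
  induction xs generalizing s with
  | nil => rfl
  | cons x t ih => simp [PySem.List.enumerate, ih]

lemma pvEnum_getElem {α : Type} (xs : List α) (s : Int) (k : Nat) (hk : k < xs.length) :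
    (PySem.List.enumerate xs s)[k]'(by rw [pvEnum_length]; exact hk) = (s + k, xs[k]) := by
  induction xs generalizing s k with
  | nil => simp at hk
  | cons x t ih =>
    cases k with
    | zero => simp [PySem.List.enumerate]
    | succ k =>
      have hk' : k < t.length := by simpa using hk
      simp only [PySem.List.enumerate, List.getElem_cons_succ]
      rw [ih (s + 1) k hk']
      rw [Prod.mk.injEq]
      refine ⟨by push_cast; ring, rfl⟩

-- bridge: an index loop 'for i in range(len(xs)): … xs[i] …' is a loop over enumerate(xs)
lemma pvFoldl_pyRange_enum {α β : Type} (xs : List α) (d : α) (F : β → Int → α → β) (init : β) :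
    (PySem.List.pyRange 0 (PySem.List.len xs) 1).foldl (fun b i => F b i (PySem.List.pyGetD xs i d)) init
      = (PySem.List.enumerate xs).foldl (fun b p => F b p.1 p.2) init := by
  have hlen : PySem.List.len xs = PySem.List.len (PySem.List.enumerate xs 0) := by
    simp [PySem.List.len_eq, pvEnum_length]
  rw [hlen]
  rw [PySem.List.foldl_congr_mem (g := fun b i =>
      (fun b (p : Int × α) => F b p.1 p.2) b (PySem.List.pyGetD (PySem.List.enumerate xs 0) i (0, d)))]
  · exact PySem.List.foldl_pyRange_pyGetD (PySem.List.enumerate xs 0) (0, d)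
      (fun b p => F b p.1 p.2) init (le_refl 0)
  · intro acc i hi
    rw [PySem.List.mem_pyRange_one] at hi
    obtain ⟨h0, h1⟩ := hi
    rw [PySem.List.len_eq, pvEnum_length] at h1
    have hi' : i.toNat < xs.length := by omega
    rw [PySem.List.pyGetD_eq_getElem (PySem.List.enumerate xs 0) (0, d) h0
      (by rw [pvEnum_length]; exact_mod_cast h1)]
    rw [PySem.List.pyGetD_eq_getElem xs d h0 (by exact_mod_cast h1)]
    rw [pvEnum_getElem xs 0 i.toNat hi']
    simp [Int.toNat_of_nonneg h0]

-- Set plumbing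
lemma pvOfList_foldl_append {γ β : Type} [BEq β] (L : List γ) (g : γ → List β) (init : List β) :
    PySem.Set.ofList (L.foldl (fun acc x => acc ++ g x) init)
      = L.foldl (fun s x => PySem.Set.update s (g x)) (PySem.Set.ofList init) := by
  induction L generalizing init with
  | nil => rfl
  | cons x t ih => simp only [List.foldl_cons, ih, PySem.Set.ofList_append]

lemma pvUpdate_flatMap {γ β : Type} [BEq β] (L : List γ) (g : γ → List β) (s : PySem.Set β) :
    PySem.Set.update s (L.flatMap g) = L.foldl (fun s x => PySem.Set.update s (g x)) s := by
  induction L generalizing s with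
  | nil => rfl
  | cons x t ih => simp only [List.flatMap_cons, PySem.Set.update_append, List.foldl_cons, ih]

lemma pvUpdate_mem {β : Type} [BEq β] [LawfulBEq β] (s : PySem.Set β) (x : β) (n : Nat) (hx : x ∈ s) :
    PySem.Set.update s (List.replicate n x) = s := by
  induction n with
  | zero => rfl
  | succ k ih =>
    rw [List.replicate_succ, PySem.Set.update_cons, PySem.Set.add_of_mem hx, ih]

lemma pvUpdate_replicate {β : Type} [BEq β] [LawfulBEq β] (s : PySem.Set β) (x : β) (n : Nat) (hn : n ≠ 0) :
    PySem.Set.update s (List.replicate n x) = PySem.Set.add s x := by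
  cases n with
  | zero => omega
  | succ k =>
    rw [List.replicate_succ, PySem.Set.update_cons]
    exact pvUpdate_mem _ _ _ ((PySem.Set.mem_add s x x).2 (Or.inr rfl))

lemma pvEnum_mem {α : Type} (xs : List α) (s : Int) (p : Int × α) (hp : p ∈ PySem.List.enumerate xs s) :
    p.2 ∈ xs := by
  induction xs generalizing s with
  | nil => simp [PySem.List.enumerate] at hp
  | cons x t ih =>
    simp only [PySem.List.enumerate, List.mem_cons] at hp
    rcases hp with h | h
    · subst h; simp
    · exact List.mem_cons_of_mem _ (ih (s + 1) h)

def pvCellA (i : Int) (d : PySem.Dict Char (List (Int × Int))) (j : Int) (c : Char) :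
    PySem.Dict Char (List (Int × Int)) :=
  if PySem.Chars.isalnum c then d.insert c (d.getD c [] ++ [(i, j)]) else d

def pvRowA (lines : List (List Char)) (d : PySem.Dict Char (List (Int × Int))) (i : Int)
    (row : List Char) : PySem.Dict Char (List (Int × Int)) :=
  (PySem.List.pyRange 0 (PySem.List.len (PySem.List.pyGetD lines 0 [])) 1).foldl
    (fun d j => pvCellA i d j (PySem.List.pyGetD row j ' ')) d

lemma pvDicts_eq (lines : List (List Char))
    (hpre : ∀ line ∈ lines, (PySem.List.pyGetD lines 0 []).length ≤ line.length) :
    pvFindAntennasA lines =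
      (PySem.List.enumerate lines).foldl (fun d il =>
        (PySem.List.enumerate (PySem.List.slice il.2 none (some (PySem.List.len (PySem.List.pyGetD lines 0 []))))).foldl (fun d jc =>
          if PySem.Chars.isalnum jc.2 then d.modify jc.2 [] (· ++ [(il.1, jc.1)]) else d) d)
        PySem.Dict.empty := by
  have h1 : pvFindAntennasA lines =
      (PySem.List.pyRange 0 (PySem.List.len lines) 1).foldl
        (fun d i => pvRowA lines d i (PySem.List.pyGetD lines i [])) PySem.Dict.empty := rfl
  rw [h1, pvFoldl_pyRange_enum lines [] (pvRowA lines) PySem.Dict.empty]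
  apply PySem.List.foldl_congr_mem
  intro d il hil
  have hrow : (PySem.List.pyGetD lines 0 []).length ≤ il.2.length :=
    hpre il.2 (pvEnum_mem lines 0 il hil)
  have hTake : PySem.List.slice il.2 none (some (PySem.List.len (PySem.List.pyGetD lines 0 [])))
      = il.2.take (PySem.List.pyGetD lines 0 []).length := by
    rw [PySem.List.len_eq, PySem.List.slice_to_natCast]
  have hT : PySem.List.len (PySem.List.pyGetD lines 0 [])
      = PySem.List.len (PySem.List.slice il.2 none (some (PySem.List.len (PySem.List.pyGetD lines 0 [])))) := by
    rw [hTake]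
    simp [PySem.List.len_eq]
    omega
  unfold pvRowA
  conv_lhs => rw [hT]
  rw [PySem.List.foldl_congr_mem _ _
    (fun d j => pvCellA il.1 d j
      (PySem.List.pyGetD (PySem.List.slice il.2 none (some (PySem.List.len (PySem.List.pyGetD lines 0 [])))) j ' ')) d ?_]
  · rw [pvFoldl_pyRange_enum _ ' ' (pvCellA il.1) d]
    rfl
  · intro acc j hj
    rw [PySem.List.mem_pyRange_one] at hj
    obtain ⟨hj0, hj1⟩ := hj
    rw [← hT, PySem.List.len_eq] at hj1
    have e : PySem.List.pyGetD (PySem.List.slice il.2 none (some (PySem.List.len (PySem.List.pyGetD lines 0 [])))) j ' '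
        = PySem.List.pyGetD il.2 j ' ' := by
      rw [hTake,
        PySem.List.pyGetD_eq_getElem _ ' ' hj0 (by simp; omega),
        PySem.List.pyGetD_eq_getElem il.2 ' ' hj0 (by push_cast; omega),
        List.getElem_take]
    simp only [e]

-- per-pair step functions (proof-side abbreviations of the two loop bodies)
def pvPairStepA (m : List (List Char)) (p : Int × Int) (s : PySem.Set (Int × Int)) (q : Int × Int) :
    PySem.Set (Int × Int) :=
  PySem.Set.update
    (PySem.Set.update s
      (pvWalkA m (PySem.Int.floordiv (p.1 - q.1) (Int.gcd (p.1 - q.1) (p.2 - q.2)))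
        (PySem.Int.floordiv (p.2 - q.2) (Int.gcd (p.1 - q.1) (p.2 - q.2)))
        (m.length + (PySem.List.pyGetD m 0 []).length + 1) (p.1, p.2)))
    (pvWalkA m (-(PySem.Int.floordiv (p.1 - q.1) (Int.gcd (p.1 - q.1) (p.2 - q.2))))
      (-(PySem.Int.floordiv (p.2 - q.2) (Int.gcd (p.1 - q.1) (p.2 - q.2))))
      (m.length + (PySem.List.pyGetD m 0 []).length + 1) (q.1, q.2))

def pvPairStepB (m : List (List Char)) (p : Int × Int) (s : PySem.Set (Int × Int)) (q : Int × Int) :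
    PySem.Set (Int × Int) :=
  PySem.Set.update
    (PySem.Set.update s
      (pvRayB p.1 p.2 (PySem.Int.floordiv (p.1 - q.1) (Int.gcd (p.1 - q.1) (p.2 - q.2)))
        (PySem.Int.floordiv (p.2 - q.2) (Int.gcd (p.1 - q.1) (p.2 - q.2)))
        (m.length : Int) ((PySem.List.pyGetD m 0 []).length : Int)))
    (pvRayB q.1 q.2 (-(PySem.Int.floordiv (p.1 - q.1) (Int.gcd (p.1 - q.1) (p.2 - q.2))))
      (-(PySem.Int.floordiv (p.2 - q.2) (Int.gcd (p.1 - q.1) (p.2 - q.2))))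
      (m.length : Int) ((PySem.List.pyGetD m 0 []).length : Int))

lemma pvStep_ne (p q : Int × Int) (hne : p ≠ q) :
    ¬(PySem.Int.floordiv (p.1 - q.1) (Int.gcd (p.1 - q.1) (p.2 - q.2)) = 0 ∧
      PySem.Int.floordiv (p.2 - q.2) (Int.gcd (p.1 - q.1) (p.2 - q.2)) = 0) := by
  set d1 := p.1 - q.1 with hd1
  set d2 := p.2 - q.2 with hd2
  have hne' : ¬(d1 = 0 ∧ d2 = 0) := by
    rintro ⟨h1, h2⟩
    exact hne (Prod.ext (by omega) (by omega))
  have hg : Int.gcd d1 d2 ≠ 0 := fun hc => hne' (Int.gcd_eq_zero_iff.1 hc)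
  have hgpos : (0 : Int) < (Int.gcd d1 d2 : Int) := by exact_mod_cast Nat.pos_of_ne_zero hg
  rintro ⟨h1, h2⟩
  apply hne'
  constructor
  · have hdvd : ((Int.gcd d1 d2 : Int)) ∣ d1 := Int.gcd_dvd_left d1 d2
    have := Int.ediv_mul_cancel hdvd
    rw [PySem.Int.floordiv_eq_ediv_of_pos hgpos] at h1
    rw [h1] at this
    simpa using this.symm
  · have hdvd : ((Int.gcd d1 d2 : Int)) ∣ d2 := Int.gcd_dvd_right d1 d2
    have := Int.ediv_mul_cancel hdvd
    rw [PySem.Int.floordiv_eq_ediv_of_pos hgpos] at h2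
    rw [h2] at this
    simpa using this.symm

lemma pvRayB_zero_step (h w x y : Int) (hin : pvInB h w x y) : pvRayB x y 0 0 h w = [(x, y)] := by
  obtain ⟨a1, a2, a3, a4⟩ := hin
  simp only [pvRayB,
    if_neg (show ¬¬(0 ≤ x ∧ x < h ∧ 0 ≤ y ∧ y < w) from not_not_intro ⟨a1, a2, a3, a4⟩)]
  norm_num [PySem.List.min?]

lemma pvPair_eq (m : List (List Char)) (p q : Int × Int) (s : PySem.Set (Int × Int)) :
    pvPairStepA m p s q = pvPairStepB m p s q := by
  by_cases hpq : p = q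
  · subst hpq
    unfold pvPairStepA pvPairStepB
    simp only [sub_self]
    have hz : PySem.Int.floordiv 0 (Int.gcd 0 0) = 0 := rfl
    rw [hz]
    simp only [neg_zero]
    by_cases hin : pvInB (m.length : Int) ((PySem.List.pyGetD m 0 []).length : Int) p.1 p.2
    · rw [pvWalkA_zero_step m _ (p.1, p.2) (by simpa using hin),
        pvRayB_zero_step _ _ _ _ hin,
        pvUpdate_replicate _ _ _ (by omega), pvUpdate_replicate _ _ _ (by omega)]
      rfl
    · rw [pvWalkA_nil m 0 0 _ (p.1, p.2) (by simpa using hin),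
        pvRayB_nil _ _ _ _ _ _ hin]
  · have hstep := pvStep_ne p q hpq
    unfold pvPairStepA pvPairStepB
    rw [pvWalkA_eq_pvRayB m _ _ hstep (p.1, p.2),
      pvWalkA_eq_pvRayB m _ _ (by omega) (q.1, q.2)]

lemma pvIf_append {β : Type} (c : Prop) [Decidable c] (acc l : List β) :
    (if c then acc else acc ++ l) = acc ++ (if c then [] else l) := by
  split_ifs <;> simp

lemma pvEnum_fst {α : Type} (xs : List α) (s : Int) (p : Int × α) (hp : p ∈ PySem.List.enumerate xs s) :
    s ≤ p.1 := by
  induction xs generalizing s with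
  | nil => simp [PySem.List.enumerate] at hp
  | cons x t ih =>
    simp only [PySem.List.enumerate, List.mem_cons] at hp
    rcases hp with h | h
    · subst h; simp
    · have := ih (s + 1) h
      omega

-- one pair's contribution to A's antinode list
def pvChunkA (m : List (List Char)) (p q : Int × Int) : List (Int × Int) :=
  pvWalkA m (PySem.Int.floordiv (p.1 - q.1) (Int.gcd (p.1 - q.1) (p.2 - q.2)))
      (PySem.Int.floordiv (p.2 - q.2) (Int.gcd (p.1 - q.1) (p.2 - q.2)))
      (m.length + (PySem.List.pyGetD m 0 []).length + 1) (p.1, p.2) ++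
    pvWalkA m (-(PySem.Int.floordiv (p.1 - q.1) (Int.gcd (p.1 - q.1) (p.2 - q.2))))
      (-(PySem.Int.floordiv (p.2 - q.2) (Int.gcd (p.1 - q.1) (p.2 - q.2))))
      (m.length + (PySem.List.pyGetD m 0 []).length + 1) (q.1, q.2)

lemma pvUpdate_chunk (m : List (List Char)) (p q : Int × Int) (s : PySem.Set (Int × Int)) :
    PySem.Set.update s (pvChunkA m p q) = pvPairStepA m p s q :=
  PySem.Set.update_append s _ _

def pvRowPairA (m : List (List Char)) (locs : List (Int × Int)) (s : PySem.Set (Int × Int))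
    (i : Int) (p : Int × Int) : PySem.Set (Int × Int) :=
  (PySem.List.pyRange (i + 1) (PySem.List.len locs) 1).foldl
    (fun s j => pvPairStepA m p s (PySem.List.pyGetD locs j (0, 0))) s

def pvFlatA (m : List (List Char)) (locs : List (Int × Int)) : List (Int × Int) :=
  (PySem.List.pyRange 0 (PySem.List.len locs) 1).flatMap (fun i =>
    (PySem.List.pyRange (i + 1) (PySem.List.len locs) 1).flatMap (fun j =>
      pvChunkA m (PySem.List.pyGetD locs i (0, 0)) (PySem.List.pyGetD locs j (0, 0))))

lemma pvFlatA_short (m : List (List Char)) (locs : List (Int × Int))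
    (hlen : PySem.List.len locs < 2) : pvFlatA m locs = [] := by
  rcases locs with _ | ⟨x, _ | ⟨y, t⟩⟩
  · rfl
  · simp [pvFlatA, PySem.List.pyRange_one]
  · simp [PySem.List.len_eq] at hlen
    omega

lemma pvGroup_eq (m : List (List Char)) (locs : List (Int × Int)) (s : PySem.Set (Int × Int)) :
    PySem.Set.update s (if PySem.List.len locs < 2 then [] else pvFlatA m locs)
      = (PySem.List.enumerate locs).foldl (fun s ap =>
          (PySem.List.slice locs (some (ap.1 + 1)) none).foldl
            (fun s q => pvPairStepB m ap.2 s q) s) s := by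
  have hguard : (if PySem.List.len locs < 2 then [] else pvFlatA m locs) = pvFlatA m locs := by
    by_cases hc : PySem.List.len locs < 2
    · rw [if_pos hc, pvFlatA_short m locs hc]
    · rw [if_neg hc]
  rw [hguard]
  unfold pvFlatA
  simp only [pvUpdate_flatMap, pvUpdate_chunk]
  have h1 : (PySem.List.pyRange 0 (PySem.List.len locs) 1).foldl
      (fun s i => pvRowPairA m locs s i (PySem.List.pyGetD locs i (0, 0))) s
      = (PySem.List.enumerate locs).foldl (fun s ap => pvRowPairA m locs s ap.1 ap.2) s :=
    pvFoldl_pyRange_enum locs (0, 0) (pvRowPairA m locs) s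
  refine Eq.trans (Eq.trans ?_ h1) ?_
  · rfl
  · apply PySem.List.foldl_congr_mem
    intro acc ap hap
    have h0 : 0 ≤ ap.1 := pvEnum_fst locs 0 ap hap
    rw [PySem.List.slice_from locs (show (0:Int) ≤ ap.1 + 1 by omega)]
    unfold pvRowPairA
    refine Eq.trans (PySem.List.foldl_pyRange_pyGetD locs (0, 0) (fun s q => pvPairStepA m ap.2 s q) acc (show (0:Int) ≤ ap.1 + 1 by omega)) ?_
    exact PySem.List.foldl_congr_mem _ _ _ _ (fun a q _ => pvPair_eq m ap.2 q a)

-- ===== VERDICT (by name: the statement is the Claim_ definition above) =====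
theorem find_antinodes_spec : Claim_equal_find_antinodes := by
  intro puzz hdom hpre
  unfold Pre_find_antinodes at hpre
  unfold Spec_find_antinodes find_antinodes find_antinodes_alt
  simp only []
  rw [pvDicts_eq _ hpre]
  simp only [List.append_assoc]
  simp only [PySem.List.foldl_append_eq_flatMap]
  simp only [pvIf_append]
  rw [pvOfList_foldl_append]
  simp only [PySem.Dict.values, List.foldl_map, PySem.Set.ofList_nil]
  exact PySem.List.foldl_congr_mem _ _ _ _
    (fun acc kv _ => pvGroup_eq (((PySem.Str.split? puzz "\n").getD []).map String.toList) kv.2 acc)
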